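-- pv_equiv track=rewrite | github.com/adhithyan15/coding-adventures | code/packages/python/cas-factor/src/cas_factor/kronecker.py | _eval_points
-- ===== SOURCE A (Python) =====
-- def _eval_points(n: int) -> list[int]:
--     """Return *n* evaluation points: 0, 1, −1, 2, −2, … in that order."""
--     pts: list[int] = []
--     i = 0
--     while len(pts) < n:
--         if i == 0:
--             pts.append(0)
--         else:
--             pts.append(i)
--             if len(pts) < n:
--                 pts.append(-i)
--         i += 1
--     return pts[:n]
-- ===== SOURCE B (Python) =====
-- def _eval_points(n: int) -> list[int]:
--     """Return *n* evaluation points: 0, 1, -1, 2, -2, ... in that order."""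
--     return [(-(k // 2) if k % 2 == 0 else (k + 1) // 2) for k in range(n)]
-- ===== Notes on version B (the rewrite author's own statement) =====
-- stated objective: simpler
-- what changed: Replaced the while loop with its i counter, len-guarded double append and final slice by a single comprehension computing each point directly from its index k via a closed form (-(k//2) for even k, (k+1)//2 for odd k).
import Mathlib
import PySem

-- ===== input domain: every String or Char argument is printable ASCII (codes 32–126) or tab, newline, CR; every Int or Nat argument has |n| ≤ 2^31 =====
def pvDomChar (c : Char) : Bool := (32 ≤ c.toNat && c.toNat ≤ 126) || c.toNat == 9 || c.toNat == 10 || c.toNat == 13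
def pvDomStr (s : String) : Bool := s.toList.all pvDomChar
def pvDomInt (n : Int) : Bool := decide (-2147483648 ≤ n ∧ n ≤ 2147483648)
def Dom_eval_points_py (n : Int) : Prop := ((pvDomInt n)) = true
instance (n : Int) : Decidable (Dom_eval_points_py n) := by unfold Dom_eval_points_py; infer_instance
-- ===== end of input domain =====

-- B replaces A's while loop (counter i, len-guarded double append, final slice) by a
-- closed form per output index; objective: simpler. Same O(n) cost.

-- ===== PORT A =====
-- the while loop: state (pts, i); body: append i (and 0 for i = 0), then -i if still short
def evalPointsLoop (n : Int) (pts : List Int) (i : Int) : List Int :=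
  if h : (pts.length : Int) < n then
    if i = 0 then
      evalPointsLoop n (pts ++ [(0 : Int)]) (i + 1)
    else
      if h2 : (((pts ++ [i]).length : Int)) < n then
        evalPointsLoop n ((pts ++ [i]) ++ [-i]) (i + 1)
      else
        evalPointsLoop n (pts ++ [i]) (i + 1)
  else pts
termination_by (n - pts.length).toNat
decreasing_by
  all_goals simp only [List.length_append, List.length_cons, List.length_nil]
  all_goals omega

def eval_points_py (n : Int) : List Int :=
  PySem.List.slice (evalPointsLoop n [] 0) none (some n)       -- pts[:n]

-- ===== PORT B =====
def eval_points_py_alt (n : Int) : List Int :=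
  (PySem.List.pyRange 0 n 1).map
    (fun k => if PySem.Int.mod k 2 = 0 then -(PySem.Int.floordiv k 2)
              else PySem.Int.floordiv (k + 1) 2)

-- ===== PRECONDITION & SPEC =====
def Spec_eval_points_py (n : Int) (out : List Int) : Prop := out = eval_points_py_alt n
instance (n : Int) (out : List Int) : Decidable (Spec_eval_points_py n out) := by unfold Spec_eval_points_py; infer_instance

-- ===== CLAIM (what is proved, stated in full; the proofs are below) =====
def Claim_equal_eval_points_py : Prop := ∀ (n : Int), Dom_eval_points_py n → Spec_eval_points_py n (eval_points_py n)

-- ===== LEMMAS AND PROOFS =====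

-- abbreviation for B's per-index closed form (proof-side only)
def evalPointsG (k : Int) : Int :=
  if PySem.Int.mod k 2 = 0 then -(PySem.Int.floordiv k 2) else PySem.Int.floordiv (k + 1) 2

theorem evalPointsG_odd (i : Int) : evalPointsG (2 * i - 1) = i := by
  unfold evalPointsG
  rw [PySem.Int.mod_eq_emod_of_pos (by omega)]
  rw [(by omega : (2 * i - 1) % 2 = 1), if_neg (by omega : (1 : Int) ≠ 0)]
  rw [PySem.Int.floordiv_eq_ediv_of_pos (by omega)]
  omega

theorem evalPointsG_even (i : Int) : evalPointsG (2 * i) = -i := by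
  unfold evalPointsG
  rw [PySem.Int.mod_eq_emod_of_pos (by omega)]
  rw [(by omega : (2 * i) % 2 = 0), if_pos rfl]
  rw [PySem.Int.floordiv_eq_ediv_of_pos (by omega)]
  omega

theorem evalPointsLoop_done (n : Int) (pts : List Int) (i : Int)
    (h : ¬ (pts.length : Int) < n) : evalPointsLoop n pts i = pts := by
  rw [evalPointsLoop, dif_neg h]

-- loop invariant: entering iteration i ≥ 1 with len(pts) = 2i-1, the loop appends
-- exactly g(2i-1), g(2i), … until n points exist
theorem evalPointsLoop_inv (n : Int) (i : Int) (pts : List Int)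
    (hi : 1 ≤ i) (hlen : (pts.length : Int) = 2 * i - 1) :
    evalPointsLoop n pts i = pts ++ (PySem.List.pyRange (2 * i - 1) n 1).map evalPointsG := by
  by_cases h : (pts.length : Int) < n
  · rw [evalPointsLoop, dif_pos h, if_neg (by omega : ¬ i = 0)]
    by_cases h2 : (((pts ++ [i]).length : Int)) < n
    · rw [dif_pos h2]
      have hlen2 : (((pts ++ [i]) ++ [-i]).length : Int) = 2 * (i + 1) - 1 := by
        simp only [List.length_append, List.length_cons, List.length_nil]; push_cast; omega
      rw [evalPointsLoop_inv n (i + 1) _ (by omega) hlen2]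
      have h2' : (2 * i : Int) < n := by
        simp only [List.length_append, List.length_cons, List.length_nil] at h2
        push_cast at h2; omega
      have e1 : PySem.List.pyRange (2 * i - 1) n 1
          = (2 * i - 1) :: (2 * i) :: PySem.List.pyRange (2 * i + 1) n 1 := by
        rw [PySem.List.pyRange_one_cons (by omega)]
        rw [(by ring : (2 * i - 1 + 1 : Int) = 2 * i)]
        rw [PySem.List.pyRange_one_cons h2']
      have e3 : (2 * (i + 1) - 1 : Int) = 2 * i + 1 := by ring
      rw [e1, e3, List.map_cons, List.map_cons, evalPointsG_odd, evalPointsG_even]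
      simp
    · rw [dif_neg h2]
      rw [evalPointsLoop_done n _ _ h2]
      have hn : n = 2 * i := by
        simp only [List.length_append, List.length_cons, List.length_nil] at h2
        push_cast at h2; omega
      have e1 : PySem.List.pyRange (2 * i - 1) n 1 = [2 * i - 1] := by
        rw [hn, PySem.List.pyRange_one_cons (by omega),
            PySem.List.pyRange_one_eq_nil (by omega)]
      rw [e1, List.map_cons, List.map_nil, evalPointsG_odd]
  · rw [evalPointsLoop_done n pts i h]
    rw [PySem.List.pyRange_one_eq_nil (by omega)]
    simp
termination_by (n - (2 * i - 1)).toNat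
decreasing_by omega

theorem evalPointsG_zero : evalPointsG 0 = 0 := by decide

theorem evalPointsLoop_closed (n : Int) :
    evalPointsLoop n [] 0 = (PySem.List.pyRange 0 n 1).map evalPointsG := by
  rw [evalPointsLoop]
  by_cases h : (0 : Int) < n
  · rw [dif_pos (by simpa using h), if_pos rfl]
    simp only [List.nil_append, zero_add]
    rw [evalPointsLoop_inv n 1 [(0 : Int)] le_rfl (by simp)]
    rw [PySem.List.pyRange_one_cons h, List.map_cons, evalPointsG_zero]
    norm_num
  · rw [dif_neg (by simpa using h), PySem.List.pyRange_one_eq_nil (by omega)]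
    simp

-- ===== VERDICT (by name: the statement is the Claim_ definition above) =====
theorem eval_points_py_spec : Claim_equal_eval_points_py := by
  intro n _
  show eval_points_py n = eval_points_py_alt n
  have halt : eval_points_py_alt n = (PySem.List.pyRange 0 n 1).map evalPointsG := rfl
  unfold eval_points_py
  rw [evalPointsLoop_closed, ← halt]
  by_cases h : (0 : Int) ≤ n
  · rw [PySem.List.slice_to _ h, List.take_of_length_le
      (by rw [halt]; simp [PySem.List.length_pyRange_one])]
  · rw [halt, PySem.List.pyRange_one_eq_nil (by omega)]
    simp [PySem.List.slice]
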